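-- pv_equiv track=rewrite | github.com/neviljk/chaincode | code/compareCode.py | outPutCells
-- ===== SOURCE A (Python) =====
-- cellCreationDictionary = {0: {'x': 1, 'y':0}, 1: {'x': 1, 'y':1}, 2: {'x': 0, 'y':1}, 3: {'x': -1, 'y':1}, 4: {'x': -1, 'y':0}, 5: {'x': -1, 'y':-1}, 6: {'x': 0, 'y':-1}, 7: {'x': 1, 'y':-1}}
--
-- def outPutCells(pattern):
--     allOutPutCells = []
--     x = 0
--     y = 0
--     newCell = str([x,y])
--     allOutPutCells.append(newCell)
--     for number in pattern:
--         number = int(number)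
--         x = x + cellCreationDictionary[number]['x']
--         y = y + cellCreationDictionary[number]['y']
--         newCell = str([x,y])
--         allOutPutCells.append(newCell)
--     return allOutPutCells
-- ===== SOURCE B (Python) =====
-- DIRS = {0: (1, 0), 1: (1, 1), 2: (0, 1), 3: (-1, 1),
--         4: (-1, 0), 5: (-1, -1), 6: (0, -1), 7: (1, -1)}
--
-- def _scan(pos, deltas):
--     if not deltas:
--         return [pos]
--     dx, dy = deltas[0]
--     return [pos] + _scan((pos[0] + dx, pos[1] + dy), deltas[1:])
--
-- def outPutCells(pattern):
--     deltas = [DIRS[int(n)] for n in pattern]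
--     positions = _scan((0, 0), deltas)
--     return [str([x, y]) for (x, y) in positions]
-- ===== Notes on version B (the rewrite author's own statement) =====
-- stated objective: alternative
-- what changed: B replaces A's single stateful loop (mutating x,y and appending formatted strings) by three separate passes: map chain codes to (dx,dy) deltas, recursively prefix-sum them into positions, then format each position.
import Mathlib
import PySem

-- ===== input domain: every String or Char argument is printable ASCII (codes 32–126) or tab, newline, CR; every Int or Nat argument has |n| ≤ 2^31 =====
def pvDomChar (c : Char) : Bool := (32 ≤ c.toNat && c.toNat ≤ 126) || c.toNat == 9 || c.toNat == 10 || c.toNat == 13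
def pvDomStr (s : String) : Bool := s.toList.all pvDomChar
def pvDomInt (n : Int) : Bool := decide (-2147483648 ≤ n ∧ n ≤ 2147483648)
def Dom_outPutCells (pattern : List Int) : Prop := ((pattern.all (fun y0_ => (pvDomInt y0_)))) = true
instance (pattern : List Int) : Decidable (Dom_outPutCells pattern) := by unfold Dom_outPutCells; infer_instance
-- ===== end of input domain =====

-- B re-decomposes A's stateful loop into three passes (delta map, recursive prefix-sum, format); equal output on codes 0..7, where A's dict lookups succeed.

-- ===== PORT A =====
-- the module constant: code ↦ {'x': dx, 'y': dy}; getD 0 is exact under Pre_ (Python raises KeyError outside 0..7, excluded by Pre_)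
def cellCreationDictionary : PySem.Dict Int (PySem.Dict String Int) :=
  PySem.Dict.ofList [(0, PySem.Dict.ofList [("x", 1), ("y", 0)]),
                     (1, PySem.Dict.ofList [("x", 1), ("y", 1)]),
                     (2, PySem.Dict.ofList [("x", 0), ("y", 1)]),
                     (3, PySem.Dict.ofList [("x", -1), ("y", 1)]),
                     (4, PySem.Dict.ofList [("x", -1), ("y", 0)]),
                     (5, PySem.Dict.ofList [("x", -1), ("y", -1)]),
                     (6, PySem.Dict.ofList [("x", 0), ("y", -1)]),
                     (7, PySem.Dict.ofList [("x", 1), ("y", -1)])]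

-- str([x, y]) in Python
def pyStrCell (x y : Int) : String := "[" ++ PySem.Int.toStr x ++ ", " ++ PySem.Int.toStr y ++ "]"

def outPutCells (pattern : List Int) : List String :=
  let allOutPutCells : List String := []
  let x : Int := 0
  let y : Int := 0
  let allOutPutCells := allOutPutCells ++ [pyStrCell x y]
  let s := pattern.foldl (fun (s : List String × Int × Int) number =>
    let (acc, x, y) := s
    let d := (cellCreationDictionary.getD number (PySem.Dict.ofList []))
    let x := x + d.getD "x" 0
    let y := y + d.getD "y" 0
    (acc ++ [pyStrCell x y], x, y)) (allOutPutCells, x, y)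
  s.1

-- ===== PORT B =====
def dirsB : PySem.Dict Int (Int × Int) :=
  PySem.Dict.ofList [(0, (1, 0)), (1, (1, 1)), (2, (0, 1)), (3, (-1, 1)),
                     (4, (-1, 0)), (5, (-1, -1)), (6, (0, -1)), (7, (1, -1))]

def scanB (pos : Int × Int) : List (Int × Int) → List (Int × Int)
  | [] => [pos]
  | (dx, dy) :: rest => pos :: scanB (pos.1 + dx, pos.2 + dy) rest

def outPutCells_alt (pattern : List Int) : List String :=
  let deltas := pattern.map (fun n => dirsB.getD n (0, 0))
  let positions := scanB (0, 0) deltas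
  positions.map (fun p => pyStrCell p.1 p.2)

-- ===== PRECONDITION & SPEC =====
-- Pre_ excludes codes outside 0..7, on which Python A (and B) raise KeyError.
def Pre_outPutCells (pattern : List Int) : Prop := ∀ n ∈ pattern, 0 ≤ n ∧ n ≤ 7
instance (pattern : List Int) : Decidable (Pre_outPutCells pattern) := by unfold Pre_outPutCells; infer_instance
def pvWitness_outPutCells : List Int := [0, 1, 7, 3]
def Spec_outPutCells (pattern : List Int) (out : List String) : Prop := out = outPutCells_alt pattern
instance (pattern : List Int) (out : List String) : Decidable (Spec_outPutCells pattern out) := by unfold Spec_outPutCells; infer_instance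

-- ===== CLAIM (what is proved, stated in full; the proofs are below) =====
def Claim_equal_outPutCells : Prop := ∀ (pattern : List Int), Dom_outPutCells pattern → Pre_outPutCells pattern → Spec_outPutCells pattern (outPutCells pattern)

-- ===== LEMMAS AND PROOFS =====

-- A's per-step x/y increments coincide with B's delta lookup (both defaults give a zero move)
lemma delta_eq (n : Int) :
    ((cellCreationDictionary.getD n (PySem.Dict.ofList [])).getD "x" 0,
     (cellCreationDictionary.getD n (PySem.Dict.ofList [])).getD "y" 0)
    = dirsB.getD n (0, 0) := by
  by_cases h0 : n = 0; · subst h0; decide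
  by_cases h1 : n = 1; · subst h1; decide
  by_cases h2 : n = 2; · subst h2; decide
  by_cases h3 : n = 3; · subst h3; decide
  by_cases h4 : n = 4; · subst h4; decide
  by_cases h5 : n = 5; · subst h5; decide
  by_cases h6 : n = 6; · subst h6; decide
  by_cases h7 : n = 7; · subst h7; decide
  simp [cellCreationDictionary, dirsB, PySem.Dict.ofList, PySem.Dict.update, PySem.Dict.getD_insert,
        PySem.Dict.getD_empty, h0, h1, h2, h3, h4, h5, h6, h7]

lemma loop_eq (l : List Int) : ∀ (x y : Int) (acc : List String),
    (l.foldl (fun (s : List String × Int × Int) number =>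
      let (acc, x, y) := s
      let d := (cellCreationDictionary.getD number (PySem.Dict.ofList []))
      let x := x + d.getD "x" 0
      let y := y + d.getD "y" 0
      (acc ++ [pyStrCell x y], x, y)) (acc ++ [pyStrCell x y], x, y)).1
    = acc ++ (scanB (x, y) (l.map (fun n => dirsB.getD n (0, 0)))).map (fun p => pyStrCell p.1 p.2) := by
  induction l with
  | nil => intro x y acc; simp [scanB]
  | cons n rest ih =>
    intro x y acc
    have hd := delta_eq n
    simp only [List.foldl_cons, List.map_cons, scanB]
    rw [show (dirsB.getD n (0, 0)) = ((cellCreationDictionary.getD n (PySem.Dict.ofList [])).getD "x" 0,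
     (cellCreationDictionary.getD n (PySem.Dict.ofList [])).getD "y" 0) from hd.symm]
    simpa using ih (x + (cellCreationDictionary.getD n (PySem.Dict.ofList [])).getD "x" 0)
      (y + (cellCreationDictionary.getD n (PySem.Dict.ofList [])).getD "y" 0)
      (acc ++ [pyStrCell x y])

-- ===== VERDICT (by name: the statement is the Claim_ definition above) =====
theorem outPutCells_spec : Claim_equal_outPutCells := by
  intro pattern _ _
  unfold Spec_outPutCells outPutCells outPutCells_alt
  simpa using loop_eq pattern 0 0 []
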